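-- pv_equiv track=rewrite | github.com/AndreyShatukho/vych_prakt | web.py | find_similar_lines
-- ===== SOURCE A (Python) =====
-- def find_similar_lines(code1, code2, original_code1, original_code2):
--     lines1 = code1.split('\n')
--     lines2 = code2.split('\n')
--
--     similar_lines = []
--
--     for line1, original_line1 in zip(lines1, original_code1):
--         for line2, original_line2 in zip(lines2, original_code2):
--             stripped_line1 = line1.strip()
--             stripped_line2 = line2.strip()
--
--             if stripped_line1 and stripped_line2 and stripped_line1 == stripped_line2:
--                 similar_lines.append((original_line1, original_line2))
--
--     return similar_lines
-- ===== SOURCE B (Python) =====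
-- def find_similar_lines(code1, code2, original_code1, original_code2):
--     # Group the second text's original lines by the stripped content of its
--     # code lines, then one pass over the first text looks matches up.
--     groups = {}
--     for line2, original_line2 in zip(code2.split('\n'), original_code2):
--         stripped2 = line2.strip()
--         if stripped2:
--             groups.setdefault(stripped2, []).append(original_line2)
--
--     similar_lines = []
--     for line1, original_line1 in zip(code1.split('\n'), original_code1):
--         stripped1 = line1.strip()
--         if stripped1:
--             for original_line2 in groups.get(stripped1, []):
--                 similar_lines.append((original_line1, original_line2))
--     return similar_lines
-- ===== Notes on version B (the rewrite author's own statement) =====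
-- stated objective: alternative
-- what changed: B builds a dict grouping the second text's original lines by stripped line content once, then does a single lookup pass over the first text, instead of A's nested line-by-line scan.
import Mathlib
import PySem

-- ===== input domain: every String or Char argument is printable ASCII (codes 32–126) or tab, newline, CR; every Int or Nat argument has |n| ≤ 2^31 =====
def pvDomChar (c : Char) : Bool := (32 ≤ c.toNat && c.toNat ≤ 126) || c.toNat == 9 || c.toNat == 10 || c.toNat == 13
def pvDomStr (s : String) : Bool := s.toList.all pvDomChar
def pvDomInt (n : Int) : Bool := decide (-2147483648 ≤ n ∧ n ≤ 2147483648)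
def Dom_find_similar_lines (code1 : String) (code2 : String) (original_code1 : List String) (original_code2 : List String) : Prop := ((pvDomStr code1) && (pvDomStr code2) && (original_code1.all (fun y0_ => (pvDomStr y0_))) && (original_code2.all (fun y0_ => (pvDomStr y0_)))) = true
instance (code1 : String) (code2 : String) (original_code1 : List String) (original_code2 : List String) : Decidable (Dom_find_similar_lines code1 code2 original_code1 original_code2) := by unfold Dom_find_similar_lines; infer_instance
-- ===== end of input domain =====

-- B groups the second text's lines in a dict once and does one lookup pass over the
-- first text, instead of A's nested line-by-line scan (objective: alternative).

-- s.split('\n'): PySem.Str.split? is some for a non-empty separator, so .getD [] is exact here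
def pySplitNl (s : String) : List String := (PySem.Str.split? s "\n").getD []

-- ===== PORT A =====
def find_similar_lines (code1 : String) (code2 : String) (original_code1 : List String) (original_code2 : List String) : List (String × String) :=
  let lines1 := pySplitNl code1
  let lines2 := pySplitNl code2
  (lines1.zip original_code1).foldl (fun acc p1 =>
    (lines2.zip original_code2).foldl (fun acc p2 =>
      let stripped1 := PySem.Str.strip p1.1
      let stripped2 := PySem.Str.strip p2.1
      if stripped1 ≠ "" ∧ stripped2 ≠ "" ∧ stripped1 = stripped2 then
        acc ++ [(p1.2, p2.2)]
      else acc) acc) []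

-- ===== PORT B =====
def find_similar_lines_alt (code1 : String) (code2 : String) (original_code1 : List String) (original_code2 : List String) : List (String × String) :=
  let groups : PySem.Dict String (List String) :=
    ((pySplitNl code2).zip original_code2).foldl (fun d p =>
      let stripped2 := PySem.Str.strip p.1
      if stripped2 ≠ "" then d.modify stripped2 [] (· ++ [p.2]) else d) PySem.Dict.empty
  ((pySplitNl code1).zip original_code1).foldl (fun acc p =>
    let stripped1 := PySem.Str.strip p.1
    if stripped1 ≠ "" then
      (groups.getD stripped1 []).foldl (fun acc o2 => acc ++ [(p.2, o2)]) acc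
    else acc) []

-- ===== PRECONDITION & SPEC =====
def Spec_find_similar_lines (code1 : String) (code2 : String) (original_code1 : List String) (original_code2 : List String) (out : List (String × String)) : Prop := out = find_similar_lines_alt code1 code2 original_code1 original_code2
instance (code1 : String) (code2 : String) (original_code1 : List String) (original_code2 : List String) (out : List (String × String)) : Decidable (Spec_find_similar_lines code1 code2 original_code1 original_code2 out) := by unfold Spec_find_similar_lines; infer_instance

-- ===== CLAIM (what is proved, stated in full; the proofs are below) =====
def Claim_equal_find_similar_lines : Prop := ∀ (code1 : String) (code2 : String) (original_code1 : List String) (original_code2 : List String), Dom_find_similar_lines code1 code2 original_code1 original_code2 → Spec_find_similar_lines code1 code2 original_code1 original_code2 (find_similar_lines code1 code2 original_code1 original_code2)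

-- ===== LEMMAS AND PROOFS =====

-- named copies of the two programs' loop bodies (definitionally equal to the lambdas in the ports)
def pvBuildStep (d : PySem.Dict String (List String)) (p : String × String) : PySem.Dict String (List String) :=
  let stripped2 := PySem.Str.strip p.1
  if stripped2 ≠ "" then d.modify stripped2 [] (· ++ [p.2]) else d

def pvAStep (p1 : String × String) (acc : List (String × String)) (p2 : String × String) : List (String × String) :=
  let stripped1 := PySem.Str.strip p1.1
  let stripped2 := PySem.Str.strip p2.1
  if stripped1 ≠ "" ∧ stripped2 ≠ "" ∧ stripped1 = stripped2 then acc ++ [(p1.2, p2.2)] else acc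

def pvBStep (pairs2 : List (String × String)) (acc : List (String × String)) (p : String × String) : List (String × String) :=
  let stripped1 := PySem.Str.strip p.1
  if stripped1 ≠ "" then
    (((pairs2.foldl pvBuildStep PySem.Dict.empty).getD stripped1 []).foldl
      (fun acc o2 => acc ++ [(p.2, o2)]) acc)
  else acc

-- the keyed, non-empty entries of the second text's (line, original) pairs
def pvKey2 (p : String × String) : Option (String × String) :=
  if PySem.Str.strip p.1 ≠ "" then some (PySem.Str.strip p.1, p.2) else none

-- the pairs one line of the first text contributes
def pvBlock (p1 : String × String) (pairs2 : List (String × String)) : List (String × String) :=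
  if PySem.Str.strip p1.1 ≠ "" then
    ((pairs2.filterMap pvKey2).filter (fun q => q.1 == PySem.Str.strip p1.1)).map (fun q => (p1.2, q.2))
  else []

-- B's conditional grouping loop is the unconditional modify-loop over the keyed pairs
lemma build_eq (pairs : List (String × String)) (d : PySem.Dict String (List String)) :
    pairs.foldl pvBuildStep d
    = (pairs.filterMap pvKey2).foldl (fun d q => d.modify q.1 [] (· ++ [q.2])) d := by
  induction pairs generalizing d with
  | nil => rfl
  | cons p rest ih =>
    rw [List.foldl_cons]
    by_cases h : PySem.Str.strip p.1 = ""
    · have h1 : pvBuildStep d p = d := by simp [pvBuildStep, h]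
      have h2 : pvKey2 p = none := by simp [pvKey2, h]
      rw [h1, List.filterMap_cons_none h2]
      exact ih d
    · have h1 : pvBuildStep d p = d.modify (PySem.Str.strip p.1) [] (· ++ [p.2]) := by
        simp [pvBuildStep, h]
      have h2 : pvKey2 p = some (PySem.Str.strip p.1, p.2) := by simp [pvKey2, h]
      rw [h1, List.filterMap_cons_some h2, List.foldl_cons]
      exact ih _
-- A's inner loop over the second text appends exactly pvBlock
lemma inner_eq (pairs2 : List (String × String)) (p1 : String × String)
    (acc : List (String × String)) :
    pairs2.foldl (pvAStep p1) acc = acc ++ pvBlock p1 pairs2 := by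
  induction pairs2 generalizing acc with
  | nil => simp [pvBlock]
  | cons p2 rest ih =>
    rw [List.foldl_cons]
    by_cases h1 : PySem.Str.strip p1.1 = ""
    · have hs : pvAStep p1 acc p2 = acc := by simp [pvAStep, h1]
      have hb : pvBlock p1 (p2 :: rest) = pvBlock p1 rest := by simp [pvBlock, h1]
      rw [hs, hb]; exact ih acc
    · by_cases h2 : PySem.Str.strip p2.1 = ""
      · have hs : pvAStep p1 acc p2 = acc := by simp [pvAStep, h2]
        have hk : pvKey2 p2 = none := by simp [pvKey2, h2]
        have hb : pvBlock p1 (p2 :: rest) = pvBlock p1 rest := by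
          unfold pvBlock
          rw [List.filterMap_cons_none hk]
        rw [hs, hb]; exact ih acc
      · have hk : pvKey2 p2 = some (PySem.Str.strip p2.1, p2.2) := by simp [pvKey2, h2]
        by_cases he : PySem.Str.strip p1.1 = PySem.Str.strip p2.1
        · have hs : pvAStep p1 acc p2 = acc ++ [(p1.2, p2.2)] := by simp [pvAStep, h2, he]
          have hb : pvBlock p1 (p2 :: rest) = (p1.2, p2.2) :: pvBlock p1 rest := by
            unfold pvBlock
            rw [List.filterMap_cons_some hk, List.filter_cons]
            simp [h1, ← he]
          rw [hs, hb, ih]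
          simp
        · have hs : pvAStep p1 acc p2 = acc := by simp [pvAStep, he]
          have hne : (PySem.Str.strip p2.1 == PySem.Str.strip p1.1) = false := by
            rw [beq_eq_false_iff_ne]; exact fun hh => he hh.symm
          have hb : pvBlock p1 (p2 :: rest) = pvBlock p1 rest := by
            unfold pvBlock
            rw [List.filterMap_cons_some hk, List.filter_cons]
            simp [h1, hne]
          rw [hs, hb]; exact ih acc

-- B's per-line step appends the same pvBlock
lemma step2_eq (pairs2 : List (String × String)) (p1 : String × String)
    (acc : List (String × String)) :
    pvBStep pairs2 acc p1 = acc ++ pvBlock p1 pairs2 := by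
  unfold pvBStep pvBlock
  by_cases h1 : PySem.Str.strip p1.1 = ""
  · simp [h1]
  · simp only [h1, ne_eq, not_false_iff, if_pos]
    rw [build_eq]
    have hget := PySem.Dict.getD_foldl_modify_append (pairs2.filterMap pvKey2)
      (PySem.Dict.empty : PySem.Dict String (List String)) (PySem.Str.strip p1.1)
    rw [show (PySem.Dict.empty : PySem.Dict String (List String)).getD (PySem.Str.strip p1.1) [] = [] from PySem.Dict.getD_empty _ _] at hget
    rw [hget]
    rw [PySem.List.foldl_append_singleton_eq_map]
    simp only [List.nil_append, List.map_map]
    rfl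

-- the two outer loops agree from any accumulator
lemma outer_eq (pairs1 pairs2 : List (String × String)) (acc : List (String × String)) :
    pairs1.foldl (fun acc p1 => pairs2.foldl (pvAStep p1) acc) acc
    = pairs1.foldl (pvBStep pairs2) acc := by
  induction pairs1 generalizing acc with
  | nil => rfl
  | cons p1 rest ih =>
    rw [List.foldl_cons, List.foldl_cons, inner_eq, step2_eq]
    exact ih _

-- ===== VERDICT (by name: the statement is the Claim_ definition above) =====
theorem find_similar_lines_spec : Claim_equal_find_similar_lines := by
  intro code1 code2 original_code1 original_code2 _
  show find_similar_lines _ _ _ _ = find_similar_lines_alt _ _ _ _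
  show ((pySplitNl code1).zip original_code1).foldl
      (fun acc p1 => (((pySplitNl code2).zip original_code2)).foldl (pvAStep p1) acc) []
    = ((pySplitNl code1).zip original_code1).foldl
      (pvBStep ((pySplitNl code2).zip original_code2)) []
  exact outer_eq _ _ []
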